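-- pv_equiv track=rewrite | github.com/EnigmaticLegacy/Personal-Projects | Python/Copying_Books_UVA-714.py | mxCopyingBooks
-- ===== SOURCE A (Python) =====
-- def mxCopyingBooks(arr, minimum, maksimum, k):
--     mid = (minimum + maksimum)//2
--     t = 1
--     total = 0
--     if(minimum >= maksimum):
--         return maksimum
--     for i in range(len(arr)):
--         if(total + arr[i] > mid):
--             t += 1
--             total = 0
--         total += arr[i]
--     if(t > k): return mxCopyingBooks(arr, mid+1, maksimum,k)
--     else: return mxCopyingBooks(arr, minimum, mid, k)
-- ===== SOURCE B (Python) =====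
-- def mxCopyingBooks(arr, minimum, maksimum, k):
--     lo, hi = minimum, maksimum
--     while lo < hi:
--         mid = (lo + hi) // 2
--         t, total = 1, 0
--         for x in arr:
--             if total + x > mid:
--                 t += 1
--                 total = 0
--             total += x
--         if t > k:
--             lo = mid + 1
--         else:
--             hi = mid
--     return hi
-- ===== Notes on version B (the rewrite author's own statement) =====
-- stated objective: idiomatic
-- what changed: Replaced A's tail recursion (each bisection step is a recursive call with a narrowed interval) by an explicit lo/hi while-loop, and the index-based for i in range(len(arr)) scan by direct iteration over the elements.
import Mathlib
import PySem

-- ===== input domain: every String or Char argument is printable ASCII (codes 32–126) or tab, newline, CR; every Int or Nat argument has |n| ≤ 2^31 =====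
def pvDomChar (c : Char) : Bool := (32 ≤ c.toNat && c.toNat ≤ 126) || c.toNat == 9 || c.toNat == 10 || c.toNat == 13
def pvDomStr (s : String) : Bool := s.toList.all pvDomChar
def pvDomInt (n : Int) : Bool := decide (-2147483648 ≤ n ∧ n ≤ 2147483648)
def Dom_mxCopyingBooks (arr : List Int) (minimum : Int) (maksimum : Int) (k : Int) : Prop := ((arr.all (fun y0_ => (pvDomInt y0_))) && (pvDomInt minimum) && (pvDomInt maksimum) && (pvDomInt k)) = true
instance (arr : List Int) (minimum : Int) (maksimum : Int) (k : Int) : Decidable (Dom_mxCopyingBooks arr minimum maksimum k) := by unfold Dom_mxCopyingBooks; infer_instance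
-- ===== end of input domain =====

-- B replaces A's tail recursion by an explicit lo/hi while-loop and scans the
-- elements directly instead of indexing via range(len(arr)); same cost (idiomatic).

-- ===== PORT A =====
-- A's greedy step on state (t, total) for book arr[i]
def pvStepA (mid : Int) (st : Int × Int) (a : Int) : Int × Int :=
  if st.2 + a > mid then (st.1 + 1, 0 + a) else (st.1, st.2 + a)

def mxCopyingBooks (arr : List Int) (minimum : Int) (maksimum : Int) (k : Int) : Int :=
  let mid := PySem.Int.floordiv (minimum + maksimum) 2
  if minimum ≥ maksimum then maksimum
  else
    -- for i in range(len(arr)): index i is always in range, so the default of pyGetD is never used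
    let st := (PySem.List.pyRange 0 (PySem.List.len arr) 1).foldl
      (fun st i => pvStepA mid st (PySem.List.pyGetD arr i 0)) (1, 0)
    if st.1 > k then mxCopyingBooks arr (mid + 1) maksimum k
    else mxCopyingBooks arr minimum mid k
termination_by (maksimum - minimum).toNat
decreasing_by
  · have h := PySem.Int.floordiv_two_mid_bounds (lo := minimum) (hi := maksimum) (by omega)
    omega
  · have h2 := (PySem.Int.floordiv_lt_iff_lt_mul (a := minimum + maksimum) (b := 2) (q := maksimum) (by omega)).mpr (by omega)
    omega

-- ===== PORT B =====
-- the inner for-x-in-arr scan of Source B, returning the scribe count t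
def pvScanB (arr : List Int) (mid : Int) : Int :=
  (arr.foldl (fun (st : Int × Int) x =>
    if st.2 + x > mid then (st.1 + 1, 0 + x) else (st.1, st.2 + x)) (1, 0)).1

-- the while lo < hi loop of Source B
def pvLoopB (arr : List Int) (k : Int) (lo : Int) (hi : Int) : Int :=
  if lo < hi then
    let mid := PySem.Int.floordiv (lo + hi) 2
    if pvScanB arr mid > k then pvLoopB arr k (mid + 1) hi
    else pvLoopB arr k lo mid
  else hi
termination_by (hi - lo).toNat
decreasing_by
  · have h := PySem.Int.floordiv_two_mid_bounds (lo := lo) (hi := hi) (by omega)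
    omega
  · have h2 := (PySem.Int.floordiv_lt_iff_lt_mul (a := lo + hi) (b := 2) (q := hi) (by omega)).mpr (by omega)
    omega

def mxCopyingBooks_alt (arr : List Int) (minimum : Int) (maksimum : Int) (k : Int) : Int :=
  pvLoopB arr k minimum maksimum

-- ===== PRECONDITION & SPEC =====
def Spec_mxCopyingBooks (arr : List Int) (minimum : Int) (maksimum : Int) (k : Int) (out : Int) : Prop := out = mxCopyingBooks_alt arr minimum maksimum k
instance (arr : List Int) (minimum : Int) (maksimum : Int) (k : Int) (out : Int) : Decidable (Spec_mxCopyingBooks arr minimum maksimum k out) := by unfold Spec_mxCopyingBooks; infer_instance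

-- ===== CLAIM (what is proved, stated in full; the proofs are below) =====
def Claim_equal_mxCopyingBooks : Prop := ∀ (arr : List Int) (minimum : Int) (maksimum : Int) (k : Int), Dom_mxCopyingBooks arr minimum maksimum k → Spec_mxCopyingBooks arr minimum maksimum k (mxCopyingBooks arr minimum maksimum k)

-- ===== LEMMAS AND PROOFS =====

-- A's index-based scan over range(len(arr)) equals B's direct scan over the elements
theorem scanA_eq_scanB (arr : List Int) (mid : Int) :
    (PySem.List.pyRange 0 (PySem.List.len arr) 1).foldl
      (fun st i => pvStepA mid st (PySem.List.pyGetD arr i 0)) (1, 0)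
    = (arr.foldl (fun (st : Int × Int) x =>
        if st.2 + x > mid then (st.1 + 1, 0 + x) else (st.1, st.2 + x)) (1, 0)) := by
  rw [PySem.List.foldl_pyRange_zero_pyGetD]
  rfl

theorem mx_eq_loop (arr : List Int) (k : Int) (minimum : Int) (maksimum : Int) :
    mxCopyingBooks arr minimum maksimum k = pvLoopB arr k minimum maksimum := by
  rw [mxCopyingBooks, pvLoopB]
  by_cases h : minimum < maksimum
  · simp only [if_pos h, if_neg (not_le.mpr h), scanA_eq_scanB, pvScanB]
    split_ifs with ht
    · exact mx_eq_loop arr k _ maksimum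
    · exact mx_eq_loop arr k minimum _
  · rw [if_pos (by omega), if_neg h]
termination_by (maksimum - minimum).toNat
decreasing_by
  · have hb := PySem.Int.floordiv_two_mid_bounds (lo := minimum) (hi := maksimum) (by omega)
    omega
  · have h2 := (PySem.Int.floordiv_lt_iff_lt_mul (a := minimum + maksimum) (b := 2) (q := maksimum) (by omega)).mpr (by omega)
    omega

-- ===== VERDICT (by name: the statement is the Claim_ definition above) =====
theorem mxCopyingBooks_spec : Claim_equal_mxCopyingBooks := by
  intro arr minimum maksimum k _
  unfold Spec_mxCopyingBooks mxCopyingBooks_alt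
  exact mx_eq_loop arr k minimum maksimum
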